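-- pv_equiv track=rewrite | github.com/SadriddinDev/BinarySearch | Problems/Easy/286.py | solve
-- ===== SOURCE A (Python) =====
-- def solve(a):
--     n = 1
--     p = 1
--     while p <= a:
--         if p == a:
--             return n
--         n+=1
--         p*=n
--     return -1
-- ===== SOURCE B (Python) =====
-- def solve(a):
--     if a < 1:
--         return -1
--     n = 1
--     while a > 1:
--         n += 1
--         if a % n != 0:
--             return -1
--         a //= n
--     return n
-- ===== Notes on version B (the rewrite author's own statement) =====
-- stated objective: alternative
-- what changed: Instead of building up the factorial product and comparing it with a, B peels successive integer divisors off a in increasing order, maintaining a shrinking quotient and failing as soon as a divisor does not divide.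
import Mathlib
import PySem

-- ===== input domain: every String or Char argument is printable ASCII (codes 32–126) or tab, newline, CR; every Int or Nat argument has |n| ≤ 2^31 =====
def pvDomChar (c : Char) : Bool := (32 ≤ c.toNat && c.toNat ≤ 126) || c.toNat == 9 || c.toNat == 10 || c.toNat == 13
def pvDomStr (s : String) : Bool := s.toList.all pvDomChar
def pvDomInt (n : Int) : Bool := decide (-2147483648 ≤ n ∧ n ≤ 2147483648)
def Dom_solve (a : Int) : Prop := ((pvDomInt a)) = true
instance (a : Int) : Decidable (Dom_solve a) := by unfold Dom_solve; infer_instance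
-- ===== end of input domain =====

-- B peels successive integer divisors off a (shrinking quotient) instead of
-- building the factorial product up and comparing it with a (A); same result everywhere.

-- ===== PORT A =====
-- A's while loop: state (n, p), p the running factorial. The proof arguments
-- 1 ≤ n, 1 ≤ p only justify termination (p strictly grows while p ≤ a).
def solveGo (a n p : Int) (hn : 1 ≤ n) (hp : 1 ≤ p) : Int :=
  if p ≤ a then
    if p = a then n
    else solveGo a (n + 1) (p * (n + 1)) (by omega) (by nlinarith)
  else -1
termination_by (a + 1 - p).toNat
decreasing_by
  have : p + 1 ≤ p * (n + 1) := by nlinarith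
  omega

def solve (a : Int) : Int := solveGo a 1 1 (by omega) (by omega)

-- ===== PORT B =====
-- B's while loop: state (a, n), a the shrinking quotient.
def solveAltGo (a n : Int) (hn : 1 ≤ n) : Int :=
  if h : 1 < a then
    if PySem.Int.mod a (n + 1) ≠ 0 then -1
    else solveAltGo (PySem.Int.floordiv a (n + 1)) (n + 1) (by omega)
  else n
termination_by a.toNat
decreasing_by
  rw [PySem.Int.floordiv_eq_ediv_of_pos (by omega)]
  have h2 : a / (n + 1) < a := by
    rw [Int.ediv_lt_iff_lt_mul (by omega)]
    nlinarith
  omega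


def solve_alt (a : Int) : Int :=
  if a < 1 then -1
  else solveAltGo a 1 (by omega)

-- ===== PRECONDITION & SPEC =====
def Spec_solve (a : Int) (out : Int) : Prop := out = solve_alt a
instance (a : Int) (out : Int) : Decidable (Spec_solve a out) := by unfold Spec_solve; infer_instance

-- ===== CLAIM (what is proved, stated in full; the proofs are below) =====
def Claim_equal_solve : Prop := ∀ (a : Int), Dom_solve a → Spec_solve a (solve a)

-- ===== LEMMAS AND PROOFS =====

-- factorial as Int
def factI (k : Nat) : Int := (Nat.factorial k : Int)

-- product (n+1) * (n+2) * ... * k  (1 if k ≤ n)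
def prodR (n : Nat) : Nat → Int
  | 0 => 1
  | k + 1 => if k + 1 ≤ n then 1 else prodR n k * (k + 1)

lemma factI_pos (k : Nat) : 1 ≤ factI k := by
  have := Nat.factorial_pos k
  unfold factI; exact_mod_cast this

lemma factI_one : factI 1 = 1 := by simp [factI, Nat.factorial]

lemma factI_succ (k : Nat) : factI (k + 1) = factI k * ((k : Int) + 1) := by
  unfold factI
  rw [Nat.factorial_succ]
  push_cast; ring

lemma factI_strict_mono {m k : Nat} (hm : 1 ≤ m) (hmk : m < k) : factI m < factI k := by
  unfold factI
  exact_mod_cast (Nat.factorial_lt hm).mpr hmk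

lemma prodR_pos (n k : Nat) : 1 ≤ prodR n k := by
  induction k with
  | zero => simp [prodR]
  | succ k ih =>
    simp only [prodR]
    split
    · omega
    · nlinarith

lemma prodR_self (n : Nat) : prodR n n = 1 := by
  cases n with
  | zero => simp [prodR]
  | succ m => simp [prodR]

lemma prodR_succ {n k : Nat} (h : n ≤ k) : prodR n (k + 1) = prodR n k * ((k : Int) + 1) := by
  simp only [prodR]
  rw [if_neg (by omega)]

lemma prodR_step {n k : Nat} (h : n < k) : prodR n k = ((n : Int) + 1) * prodR (n + 1) k := by
  induction k with
  | zero => omega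
  | succ k ih =>
    by_cases hk : n < k
    · rw [prodR_succ (by omega), prodR_succ (by omega), ih hk]; ring
    · have : k = n := by omega
      subst this
      rw [prodR_succ (by omega), prodR_self, prodR_self]
      ring

lemma prodR_one_eq_fact {k : Nat} (h : 1 ≤ k) : prodR 1 k = factI k := by
  induction k with
  | zero => omega
  | succ k ih =>
    by_cases hk : 1 ≤ k
    · rw [prodR_succ hk, ih hk, factI_succ]
    · have : k = 0 := by omega
      subst this
      simp [prodR, factI, Nat.factorial]

-- ---------- A-side characterisation ----------

lemma solveGo_congr {a n n' p p' : Int} (h1 : n = n') (h2 : p = p')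
    {hn : 1 ≤ n} {hp : 1 ≤ p} {hn' : 1 ≤ n'} {hp' : 1 ≤ p'} :
    solveGo a n p hn hp = solveGo a n' p' hn' hp' := by subst h1; subst h2; rfl

lemma solveAltGo_congr {a a' n n' : Int} (h1 : a = a') (h2 : n = n')
    {hn : 1 ≤ n} {hn' : 1 ≤ n'} :
    solveAltGo a n hn = solveAltGo a' n' hn' := by subst h1; subst h2; rfl

lemma solveGo_hits (a : Int) (k : Nat) (ha : factI k = a) :
    ∀ (d n : Nat), k - n = d → 1 ≤ n → n ≤ k →
      ∀ hn hp, solveGo a (n : Int) (factI n) hn hp = (k : Int) := by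
  intro d
  induction d with
  | zero =>
    intro n hd h1 h2 hn hp
    have : n = k := by omega
    subst this
    unfold solveGo
    simp [ha]
  | succ d ih =>
    intro n hd h1 h2 hn hp
    have hlt : n < k := by omega
    have hplt : factI n < a := ha ▸ factI_strict_mono h1 hlt
    unfold solveGo
    rw [if_pos (by omega), if_neg (by omega)]
    have hfs : factI n * ((n : Int) + 1) = factI (n + 1) := (factI_succ n).symm
    have hcast : ((n : Int) + 1) = ((n + 1 : Nat) : Int) := by push_cast; ring
    exact (solveGo_congr hcast hfs (hn' := by omega) (hp' := factI_pos _)).trans (ih (n + 1) (by omega) (by omega) (by omega) _ _)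

lemma solveGo_misses (a : Int) :
    ∀ (fuel : Nat) (n : Nat), 1 ≤ n → (a + 1 - factI n).toNat ≤ fuel →
      (∀ k : Nat, n ≤ k → factI k ≠ a) →
      ∀ hn hp, solveGo a (n : Int) (factI n) hn hp = -1 := by
  intro fuel
  induction fuel with
  | zero =>
    intro n h1 hf hmiss hn hp
    unfold solveGo
    rw [if_neg (by omega)]
  | succ f ih =>
    intro n h1 hf hmiss hn hp
    unfold solveGo
    by_cases hle : factI n ≤ a
    · rw [if_pos hle, if_neg (hmiss n (by omega))]
      have hfp := factI_pos n
      have hn1 : (1 : Int) ≤ (n : Int) := by exact_mod_cast h1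
      have hgrow : factI n + 1 ≤ factI n * ((n : Int) + 1) := by nlinarith
      have hfs : factI n * ((n : Int) + 1) = factI (n + 1) := (factI_succ n).symm
      have hcast : ((n : Int) + 1) = ((n + 1 : Nat) : Int) := by push_cast; ring
      exact (solveGo_congr hcast hfs (hn' := by omega) (hp' := factI_pos _)).trans (ih (n + 1) (by omega) (by rw [← hfs]; omega)
        (fun k hk => hmiss k (by omega)) _ _)
    · rw [if_neg hle]

-- ---------- B-side characterisation ----------

lemma solveAltGo_hits (k : Nat) :
    ∀ (d n : Nat), k - n = d → 1 ≤ n → n ≤ k →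
      ∀ hn, solveAltGo (prodR n k) (n : Int) hn = (k : Int) := by
  intro d
  induction d with
  | zero =>
    intro n hd h1 h2 hn
    have : n = k := by omega
    subst this
    unfold solveAltGo
    rw [dif_neg (by rw [prodR_self]; omega)]
  | succ d ih =>
    intro n hd h1 h2 hn
    have hlt : n < k := by omega
    have hstep := prodR_step hlt
    have hpos := prodR_pos (n + 1) k
    have hn1 : (1 : Int) ≤ (n : Int) := by exact_mod_cast h1
    have hbig : 1 < prodR n k := by rw [hstep]; nlinarith
    unfold solveAltGo
    rw [dif_pos hbig]
    have hdvd : ((n : Int) + 1) ∣ prodR n k := ⟨prodR (n + 1) k, hstep⟩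
    have hmod : PySem.Int.mod (prodR n k) ((n : Int) + 1) = 0 :=
      (PySem.Int.mod_eq_zero_iff_dvd _ _).mpr hdvd
    rw [if_neg (not_not_intro hmod)]
    have hdiv : PySem.Int.floordiv (prodR n k) ((n : Int) + 1) = prodR (n + 1) k := by
      rw [PySem.Int.floordiv_eq_ediv_of_pos (by omega), hstep,
        Int.mul_ediv_cancel_left _ (by omega)]
    have hcast : ((n : Int) + 1) = ((n + 1 : Nat) : Int) := by push_cast; ring
    exact (solveAltGo_congr hdiv hcast (hn' := by omega)).trans (ih (n + 1) (by omega) (by omega) (by omega) _)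

lemma solveAltGo_misses :
    ∀ (fuel : Nat) (a : Int) (n : Nat), 1 ≤ n → 1 ≤ a → a.toNat ≤ fuel →
      (∀ k : Nat, n ≤ k → prodR n k ≠ a) →
      ∀ hn, solveAltGo a (n : Int) hn = -1 := by
  intro fuel
  induction fuel with
  | zero => intro a n h1 ha hf; omega
  | succ f ih =>
    intro a n h1 ha hf hmiss hn
    have hn1 : (1 : Int) ≤ (n : Int) := by exact_mod_cast h1
    by_cases hbig : 1 < a
    · unfold solveAltGo
      rw [dif_pos hbig]
      by_cases hmod : PySem.Int.mod a ((n : Int) + 1) = 0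
      · rw [if_neg (not_not_intro hmod)]
        have hdvd : ((n : Int) + 1) ∣ a := (PySem.Int.mod_eq_zero_iff_dvd _ _).mp hmod
        obtain ⟨c, hc⟩ := hdvd
        have hc1 : 1 ≤ c := by nlinarith
        have hdiv : PySem.Int.floordiv a ((n : Int) + 1) = c := by
          rw [PySem.Int.floordiv_eq_ediv_of_pos (by omega), hc,
            Int.mul_ediv_cancel_left _ (by omega)]
        have hclt : c < a := by nlinarith
        have hmiss' : ∀ k : Nat, n + 1 ≤ k → prodR (n + 1) k ≠ c := by
          intro k hk heq
          exact hmiss k (by omega) (by rw [prodR_step (show n < k by omega), heq, hc])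
        have hcast : ((n : Int) + 1) = ((n + 1 : Nat) : Int) := by push_cast; ring
        exact (solveAltGo_congr hdiv hcast (hn' := by omega)).trans (ih c (n + 1) (by omega) hc1 (by omega) hmiss' _)
      · rw [if_pos hmod]
    · exfalso
      have h1a : a = 1 := by omega
      exact hmiss n (by omega) (by rw [prodR_self, h1a])

-- ===== VERDICT (by name: the statement is the Claim_ definition above) =====
theorem solve_spec : Claim_equal_solve := by
  intro a _
  unfold Spec_solve solve solve_alt
  by_cases hex : ∃ k : Nat, 1 ≤ k ∧ factI k = a
  · obtain ⟨k, hk1, hka⟩ := hex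
    have ha1 : 1 ≤ a := hka ▸ factI_pos k
    rw [if_neg (by omega)]
    have hA := solveGo_hits a k hka (k - 1) 1 rfl (by omega) hk1
      (by omega) (factI_one ▸ factI_pos 1)
    have hB := solveAltGo_hits k (k - 1) 1 rfl (by omega) hk1 (by omega)
    rw [prodR_one_eq_fact hk1, hka] at hB
    simp only [Nat.cast_one, factI_one] at hA hB
    rw [hA, hB]
  · simp only [not_exists, not_and] at hex
    have hmissA : ∀ k : Nat, 1 ≤ k → factI k ≠ a := fun k hk => hex k hk
    have hA := solveGo_misses a (a + 1 - factI 1).toNat 1 (by omega)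
      (le_refl _) hmissA (by omega) (factI_one ▸ factI_pos 1)
    simp only [Nat.cast_one, factI_one] at hA
    rw [hA]
    by_cases ha : a < 1
    · rw [if_pos ha]
    · rw [if_neg ha]
      have hB := solveAltGo_misses a.toNat a 1 (by omega) (by omega) (le_refl _)
        (fun k hk heq => hex k hk (by rw [← prodR_one_eq_fact hk, heq])) (by omega)
      simp only [Nat.cast_one] at hB
      rw [hB]
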